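-- pv_equiv track=rewrite | github.com/OrensteinLab/SynRBPbind | utiles.py | polymorph
-- ===== SOURCE A (Python) =====
-- import itertools
--
-- def polymorph(wt, n_mut):
--     for locs in itertools.combinations(range(len(wt)), n_mut):
--         this_word = [[char] for char in wt]
--         for loc in locs:
--             orig_char = wt[loc]
--             this_word[loc] = [l for l in "ACGU" if l != orig_char]
--         for poss in itertools.product(*this_word):
--             yield ''.join(poss)
-- ===== SOURCE B (Python) =====
-- def polymorph(wt, n_mut):
--     def groups(i, k):
--         # one block of sequences per choice of k mutated positions in wt[i:],
--         # blocks ordered by lexicographic position sets, entries with the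
--         # earliest mutated position's letter varying slowest
--         if k == 0:
--             return [[wt[i:]]]
--         if len(wt) - i < k:
--             return []
--         alts = [a for a in "ACGU" if a != wt[i]]
--         out = [[a + s for a in alts for s in grp] for grp in groups(i + 1, k - 1)]
--         out += [[wt[i] + s for s in grp] for grp in groups(i + 1, k)]
--         return out
--     for grp in groups(0, n_mut):
--         yield from grp
-- ===== Notes on version B (the rewrite author's own statement) =====
-- stated objective: alternative
-- what changed: B drops itertools entirely and generates the sequences by one structural recursion over the string with a mutation budget (mutate-here branch before keep-here branch), grouping results into per-position-set blocks so the emission order is preserved, instead of enumerating position combinations and then taking a cartesian product of per-position option lists.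
import Mathlib
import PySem

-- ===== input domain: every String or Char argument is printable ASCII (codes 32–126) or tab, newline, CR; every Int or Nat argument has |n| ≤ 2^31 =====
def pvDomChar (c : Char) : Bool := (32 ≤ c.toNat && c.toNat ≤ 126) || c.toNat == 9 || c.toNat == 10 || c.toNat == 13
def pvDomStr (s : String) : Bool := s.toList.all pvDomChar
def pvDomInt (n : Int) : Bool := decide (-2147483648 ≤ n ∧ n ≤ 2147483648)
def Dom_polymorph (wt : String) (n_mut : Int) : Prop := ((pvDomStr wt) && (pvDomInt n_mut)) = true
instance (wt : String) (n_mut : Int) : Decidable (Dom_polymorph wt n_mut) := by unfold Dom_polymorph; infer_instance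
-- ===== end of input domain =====

-- B generates the sequences by one structural recursion over the string with a mutation
-- budget (no itertools), grouped into per-position-set blocks; alternative decomposition.


-- ===== PORT A =====
-- itertools.combinations over a list, in itertools' lexicographic emission order (exact)
def pyCombinations : List Nat → Nat → List (List Nat)
  | _, 0 => [[]]
  | [], _ + 1 => []
  | x :: xs, k + 1 => (pyCombinations xs k).map (x :: ·) ++ pyCombinations xs (k + 1)

-- itertools.product over a list of pools, last pool varying fastest (exact)
def pyProduct : List (List Char) → List (List Char)
  | [] => [[]]
  | l :: ls => l.flatMap (fun c => (pyProduct ls).map (c :: ·))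

-- A: build the n-wide this_word (singletons, overwritten at each loc) and product over all of it
def polymorph (wt : String) (n_mut : Int) : List String :=
  let ws := wt.toList
  (pyCombinations (List.range ws.length) n_mut.toNat).flatMap (fun locs =>
    let this_word :=
      locs.foldl (fun tw loc => tw.set loc ("ACGU".toList.filter (· ≠ ws.getD loc ' ')))
        (ws.map (fun c => [c]))
    (pyProduct this_word).map (fun poss => String.ofList poss))

-- ===== PORT B =====
-- B: one structural recursion over the string with a mutation budget; each block of the
-- result corresponds to one set of mutated positions (mutate-here blocks first).
def altGroups : List Char → Nat → List (List (List Char))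
  | rest, 0 => [[rest]]
  | [], _ + 1 => []
  | c :: cs, k + 1 =>
    if cs.length + 1 < k + 1 then []
    else
      (altGroups cs k).map (fun grp =>
          ("ACGU".toList.filter (· ≠ c)).flatMap (fun a => grp.map (a :: ·)))
        ++ (altGroups cs (k + 1)).map (fun grp => grp.map (c :: ·))

def polymorph_alt (wt : String) (n_mut : Int) : List String :=
  ((altGroups wt.toList n_mut.toNat).flatten).map (fun l => String.ofList l)

-- ===== PRECONDITION & SPEC =====
-- Pre_ excludes n_mut < 0, on which Python's itertools.combinations (in A) raises ValueError.
def Pre_polymorph (_wt : String) (n_mut : Int) : Prop := 0 ≤ n_mut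
instance (wt : String) (n_mut : Int) : Decidable (Pre_polymorph wt n_mut) := by unfold Pre_polymorph; infer_instance
def pvWitness_polymorph : String × Int := ("AC", 1)

def Spec_polymorph (wt : String) (n_mut : Int) (out : List String) : Prop := out = polymorph_alt wt n_mut
instance (wt : String) (n_mut : Int) (out : List String) : Decidable (Spec_polymorph wt n_mut out) := by unfold Spec_polymorph; infer_instance

-- ===== CLAIM (what is proved, stated in full; the proofs are below) =====
def Claim_equal_polymorph : Prop := ∀ (wt : String) (n_mut : Int), Dom_polymorph wt n_mut → Pre_polymorph wt n_mut → Spec_polymorph wt n_mut (polymorph wt n_mut)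

-- ===== LEMMAS AND PROOFS =====

-- choosing more elements than available yields nothing
theorem pyCombinations_nil_of_lt (xs : List Nat) (k : Nat) (h : xs.length < k) :
    pyCombinations xs k = [] := by
  induction xs generalizing k with
  | nil => cases k with
    | zero => omega
    | succ k => rfl
  | cons x xs ih =>
    cases k with
    | zero => omega
    | succ k =>
      simp only [pyCombinations]
      rw [ih k (by simpa using h), ih (k + 1) (by simp at h ⊢; omega)]
      rfl

-- combinations of a shifted list are shifted combinations
theorem pyCombinations_map_shift (xs : List Nat) (k : Nat) :
    pyCombinations (xs.map (· + 1)) k = (pyCombinations xs k).map (List.map (· + 1)) := by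
  induction xs generalizing k with
  | nil => cases k <;> rfl
  | cons x xs ih =>
    cases k with
    | zero => rfl
    | succ k =>
      simp only [List.map_cons, pyCombinations, ih, List.map_append, List.map_map]
      rfl

-- product of all-singleton pools is the single word
theorem pyProduct_singletons (ws : List Char) :
    pyProduct (ws.map (fun c => [c])) = [ws] := by
  induction ws with
  | nil => simp [pyProduct]
  | cons c cs ih => simp [pyProduct, ih]

-- shifting a foldl-of-sets past a fixed head (positions all ≥ 1)
theorem foldl_set_shift {α : Type} (f : Nat → α) (locs : List Nat)
    (h : ∀ l ∈ locs, 1 ≤ l) (hd : α) (tl : List α) :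
    locs.foldl (fun tw loc => tw.set loc (f loc)) (hd :: tl)
      = hd :: (locs.map (· - 1)).foldl (fun tw loc => tw.set loc (f (loc + 1))) tl := by
  induction locs generalizing tl with
  | nil => simp
  | cons l ls ih =>
    have h1 : 1 ≤ l := h l (by simp)
    obtain ⟨l', rfl⟩ : ∃ l', l = l' + 1 := ⟨l - 1, by omega⟩
    simp only [List.foldl_cons, List.set_cons_succ, List.map_cons, Nat.add_sub_cancel]
    exact ih (fun x hx => h x (by simp [hx])) _

-- the per-combination products, in combination order, are exactly B's blocks
theorem map_product_eq_altGroups (ws : List Char) (k : Nat) :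
    (pyCombinations (List.range ws.length) k).map (fun locs =>
        pyProduct (locs.foldl
          (fun tw loc => tw.set loc ("ACGU".toList.filter (· ≠ ws.getD loc ' ')))
          (ws.map (fun c => [c]))))
      = altGroups ws k := by
  induction ws generalizing k with
  | nil =>
    cases k with
    | zero => simp [pyCombinations, altGroups, pyProduct]
    | succ k => rfl
  | cons c cs ih =>
    cases k with
    | zero => simp [pyCombinations, altGroups, pyProduct, pyProduct_singletons]
    | succ k =>
      by_cases hlen : cs.length + 1 < k + 1
      · rw [altGroups]
        simp only [hlen, if_true]
        rw [pyCombinations_nil_of_lt _ _ (by simpa using hlen), List.map_nil]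
      · rw [altGroups]
        simp only [hlen, if_false]
        have hr : List.range (c :: cs).length = 0 :: (List.range cs.length).map (· + 1) := by
          simp [List.range_succ_eq_map]
        rw [hr, pyCombinations, List.map_append, List.map_map, pyCombinations_map_shift,
          pyCombinations_map_shift, List.map_map, List.map_map]
        congr 1
        · -- blocks whose combination contains position 0
          rw [← ih k, List.map_map]
          refine List.map_congr_left (fun locs _ => ?_)
          simp only [Function.comp_apply]
          have hge : ∀ x ∈ locs.map (· + 1), 1 ≤ x := by
            intro x hx; rcases List.mem_map.mp hx with ⟨y, _, rfl⟩; omega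
          simp only [List.foldl_cons, List.map_cons, List.set_cons_zero, List.getD_cons_zero]
          rw [foldl_set_shift _ _ hge]
          have hback : (locs.map (· + 1)).map (· - 1) = locs := by
            rw [List.map_map]
            exact List.map_congr_left (fun x _ => by simp) |>.trans (List.map_id locs)
          rw [hback]
          simp only [pyProduct, List.getD_cons_succ]
        · -- blocks whose combination avoids position 0
          rw [← ih (k + 1), List.map_map]
          refine List.map_congr_left (fun locs _ => ?_)
          simp only [Function.comp_apply]
          have hge : ∀ x ∈ locs.map (· + 1), 1 ≤ x := by
            intro x hx; rcases List.mem_map.mp hx with ⟨y, _, rfl⟩; omega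
          simp only [List.map_cons]
          rw [foldl_set_shift _ _ hge]
          have hback : (locs.map (· + 1)).map (· - 1) = locs := by
            rw [List.map_map]
            exact List.map_congr_left (fun x _ => by simp) |>.trans (List.map_id locs)
          rw [hback]
          simp only [pyProduct, List.flatMap_cons, List.flatMap_nil, List.append_nil,
            List.getD_cons_succ]

-- ===== VERDICT (by name: the statement is the Claim_ definition above) =====
theorem polymorph_spec : Claim_equal_polymorph := by
  intro wt n_mut _ _
  unfold Spec_polymorph polymorph polymorph_alt
  rw [← map_product_eq_altGroups wt.toList n_mut.toNat]
  simp only [List.flatMap_def, List.map_flatten, List.map_map]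
  rfl
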